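-- pv_equiv track=rewrite | github.com/tobySolutions/super-tobi | scripts/email_triage.py | match_to_application
-- ===== SOURCE A (Python) =====
-- def match_to_application(subject, sender, body, apps):
--     """Try to match an email to a tracked job application."""
--     text = f"{subject} {sender} {body}".lower()
--
--     matches = []
--     for app in apps:
--         company = app.get("company", "").lower()
--         role = app.get("role", "").lower()
--
--         if not company or company == "unknown":
--             continue
--
--         # Check if company name appears in the email
--         if company in text:
--             # Bonus if role also appears
--             role_words = [w for w in role.split() if len(w) > 3]
--             role_match = any(w.lower() in text for w in role_words)
--             matches.append((app, role_match))
--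
--     if matches:
--         # Prefer matches where role also matched
--         role_matches = [m for m in matches if m[1]]
--         if role_matches:
--             return role_matches[0][0]
--         return matches[0][0]
--
--     return None
-- ===== SOURCE B (Python) =====
-- def match_to_application(subject, sender, body, apps):
--     """Reverse fold: walk apps back-to-front, overwriting the surviving
--     company-only and company+role candidates, so after the walk each survivor
--     is the earliest such app in original order; prefer the role survivor."""
--     text = f"{subject} {sender} {body}".lower()
--     best_role = None
--     best_company = None
--     for app in reversed(apps):
--         company = app.get("company", "").lower()
--         if not company or company == "unknown" or company not in text:
--             continue
--         best_company = app
--         role = app.get("role", "").lower()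
--         if any(w.lower() in text for w in role.split() if len(w) > 3):
--             best_role = app
--     return best_role if best_role is not None else best_company
-- ===== Notes on version B (the rewrite author's own statement) =====
-- stated objective: alternative
-- what changed: Replaced collect-all-matches-into-a-list-then-filter-twice with a reverse traversal that builds no list: walking apps back-to-front and overwriting two single-slot survivors (company+role hit, company-only hit) leaves exactly the earliest app of each kind, and the role survivor is preferred.
import Mathlib
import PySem

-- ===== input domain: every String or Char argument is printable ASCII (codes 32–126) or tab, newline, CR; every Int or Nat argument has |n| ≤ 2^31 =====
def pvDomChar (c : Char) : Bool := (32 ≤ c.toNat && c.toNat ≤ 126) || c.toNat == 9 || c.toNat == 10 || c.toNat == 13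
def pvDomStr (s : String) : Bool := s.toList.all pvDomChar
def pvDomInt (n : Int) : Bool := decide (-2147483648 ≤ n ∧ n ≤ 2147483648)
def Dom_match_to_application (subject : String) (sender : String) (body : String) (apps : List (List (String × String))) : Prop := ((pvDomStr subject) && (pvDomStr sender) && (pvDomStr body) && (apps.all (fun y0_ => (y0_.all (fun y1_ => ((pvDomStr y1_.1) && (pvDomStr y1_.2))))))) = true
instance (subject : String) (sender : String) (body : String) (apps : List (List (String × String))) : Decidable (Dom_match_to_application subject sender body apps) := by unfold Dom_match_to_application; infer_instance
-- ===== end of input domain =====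

-- B replaces A's collect-matches-into-a-list-then-filter-twice with a list-free reverse traversal
-- that overwrites two single-slot survivors; objective: alternative decomposition (same cost).

-- shared leaf helpers: dict.get(k, "") and the role-words predicate (identical lines in both Pythons)
def pvGet (app : List (String × String)) (k : String) : String :=
  (PySem.Dict.mk app).getD k ""

def pvRoleMatch (text : String) (role : String) : Bool :=
  ((PySem.Str.split₀ role).filter (fun w => 3 < PySem.Str.len w)).any
    (fun w => PySem.Str.isIn (PySem.Str.lower w) text)

-- ===== PORT A =====
def match_to_application (subject : String) (sender : String) (body : String) (apps : List (List (String × String))) : Option (List (String × String)) :=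
  let text := PySem.Str.lower (PySem.Str.join " " [subject, sender, body])
  let ms := apps.foldl (fun acc app =>
    if PySem.Str.lower (pvGet app "company") = "" ∨ PySem.Str.lower (pvGet app "company") = "unknown" then acc
    else if PySem.Str.isIn (PySem.Str.lower (pvGet app "company")) text then
      acc ++ [(app, pvRoleMatch text (PySem.Str.lower (pvGet app "role")))]
    else acc) []
  if ms.isEmpty then none
  else
    match ms.filter (fun m => m.2) with
    | rm :: _ => some rm.1
    | [] =>
      match ms with
      | m :: _ => some m.1
      | [] => none

-- ===== PORT B =====
-- B's loop over reversed(apps) with the two overwrite slots (best_role, best_company)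
def match_to_application_alt (subject : String) (sender : String) (body : String) (apps : List (List (String × String))) : Option (List (String × String)) :=
  let text := PySem.Str.lower (PySem.Str.join " " [subject, sender, body])
  let st := apps.reverse.foldl (fun st app =>
    if PySem.Str.lower (pvGet app "company") = "" ∨ PySem.Str.lower (pvGet app "company") = "unknown"
        ∨ PySem.Str.isIn (PySem.Str.lower (pvGet app "company")) text = false then st
    else ((if pvRoleMatch text (PySem.Str.lower (pvGet app "role")) then some app else st.1), some app))
    ((none : Option (List (String × String))), (none : Option (List (String × String))))
  match st.1 with
  | some r => some r
  | none => st.2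

-- ===== PRECONDITION & SPEC =====
def Spec_match_to_application (subject : String) (sender : String) (body : String) (apps : List (List (String × String))) (out : Option (List (String × String))) : Prop := out = match_to_application_alt subject sender body apps
instance (subject : String) (sender : String) (body : String) (apps : List (List (String × String))) (out : Option (List (String × String))) : Decidable (Spec_match_to_application subject sender body apps out) := by unfold Spec_match_to_application; infer_instance

-- ===== CLAIM =====
def Claim_equal_match_to_application : Prop := ∀ (subject : String) (sender : String) (body : String) (apps : List (List (String × String))), Dom_match_to_application subject sender body apps → Spec_match_to_application subject sender body apps (match_to_application subject sender body apps)

-- ===== LEMMAS AND PROOFS =====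

-- one candidate step of A's loop, as a filterMap function (proof-only)
def pvCand (text : String) (app : List (String × String)) : Option (List (String × String) × Bool) :=
  if PySem.Str.lower (pvGet app "company") = "" ∨ PySem.Str.lower (pvGet app "company") = "unknown" then none
  else if PySem.Str.isIn (PySem.Str.lower (pvGet app "company")) text then
    some (app, pvRoleMatch text (PySem.Str.lower (pvGet app "role")))
  else none

theorem pv_foldl_eq_filterMap (text : String) (apps : List (List (String × String)))
    (acc : List (List (String × String) × Bool)) :
    apps.foldl (fun acc app =>
      if PySem.Str.lower (pvGet app "company") = "" ∨ PySem.Str.lower (pvGet app "company") = "unknown" then acc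
      else if PySem.Str.isIn (PySem.Str.lower (pvGet app "company")) text then
        acc ++ [(app, pvRoleMatch text (PySem.Str.lower (pvGet app "role")))]
      else acc) acc
    = acc ++ apps.filterMap (pvCand text) := by
  induction apps generalizing acc with
  | nil => simp
  | cons app rest ih =>
    rw [List.foldl_cons, List.filterMap_cons]
    by_cases h1 : PySem.Str.lower (pvGet app "company") = "" ∨ PySem.Str.lower (pvGet app "company") = "unknown"
    · have hc : pvCand text app = none := by unfold pvCand; rw [if_pos h1]
      simp only [if_pos h1, hc, ih]
    · cases hb : PySem.Str.isIn (PySem.Str.lower (pvGet app "company")) text with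
      | false =>
        have hc : pvCand text app = none := by
          simp only [pvCand, if_neg h1, hb, Bool.false_eq_true, if_false]
        simp only [if_neg h1, Bool.false_eq_true, if_false, hc, ih]
      | true =>
        have hc : pvCand text app = some (app, pvRoleMatch text (PySem.Str.lower (pvGet app "role"))) := by
          simp only [pvCand, if_neg h1, hb, if_true]
        simp only [if_neg h1, if_true, hc, ih, List.append_assoc, List.singleton_append]

-- B's reverse foldl is a foldr; the foldr leaves the earliest role-hit and earliest company-hit
theorem pv_foldr_eq (text : String) (apps : List (List (String × String))) :
    apps.foldr (fun app st =>
      if PySem.Str.lower (pvGet app "company") = "" ∨ PySem.Str.lower (pvGet app "company") = "unknown"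
          ∨ PySem.Str.isIn (PySem.Str.lower (pvGet app "company")) text = false then st
      else ((if pvRoleMatch text (PySem.Str.lower (pvGet app "role")) then some app else st.1), some app))
      ((none : Option (List (String × String))), (none : Option (List (String × String))))
    = ((((apps.filterMap (pvCand text)).filter (fun m => m.2)).head?).map (fun m => m.1),
       ((apps.filterMap (pvCand text)).head?).map (fun m => m.1)) := by
  induction apps with
  | nil => simp
  | cons app rest ih =>
    rw [List.foldr_cons, List.filterMap_cons, ih]
    by_cases h1 : PySem.Str.lower (pvGet app "company") = "" ∨ PySem.Str.lower (pvGet app "company") = "unknown"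
    · have hc : pvCand text app = none := by unfold pvCand; rw [if_pos h1]
      have hs : PySem.Str.lower (pvGet app "company") = "" ∨ PySem.Str.lower (pvGet app "company") = "unknown"
          ∨ PySem.Str.isIn (PySem.Str.lower (pvGet app "company")) text = false := by tauto
      simp only [if_pos hs, hc]
    · cases hb : PySem.Str.isIn (PySem.Str.lower (pvGet app "company")) text with
      | false =>
        have hc : pvCand text app = none := by
          simp only [pvCand, if_neg h1, hb, Bool.false_eq_true, if_false]
        simp only [hb, hc, or_true, if_true]
      | true =>
        have hc : pvCand text app = some (app, pvRoleMatch text (PySem.Str.lower (pvGet app "role"))) := by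
          simp only [pvCand, if_neg h1, hb, if_true]
        rw [if_neg (show ¬ (PySem.Str.lower (pvGet app "company") = "" ∨ PySem.Str.lower (pvGet app "company") = "unknown"
            ∨ (true : Bool) = false) by simpa using h1), hc]
        cases hr : pvRoleMatch text (PySem.Str.lower (pvGet app "role")) with
        | true => simp [List.filter_cons, hr]
        | false => simp [List.filter_cons, hr]

-- ===== VERDICT =====
theorem match_to_application_spec : Claim_equal_match_to_application := by
  intro subject sender body apps _
  simp only [Spec_match_to_application, match_to_application, match_to_application_alt]
  rw [pv_foldl_eq_filterMap, List.foldl_reverse, List.nil_append]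
  beta_reduce
  rw [pv_foldr_eq]
  cases hm : apps.filterMap (pvCand (PySem.Str.lower (PySem.Str.join " " [subject, sender, body]))) with
  | nil => rfl
  | cons m rest =>
    rw [List.isEmpty_cons, if_neg Bool.false_ne_true]
    cases hf : ((m :: rest).filter (fun m => m.2)) with
    | nil => simp [hf]
    | cons rm rs => simp [hf]
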